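-- pv_equiv track=rewrite | github.com/submissionforpaper/CAFE-Closed-Loop-Autonomous-Task-Formulation-and-Execution-without-Explicit-Task-Input | CAFE/aithor2/embodied B1/main.py | _reconstruct_json_from_lines
-- ===== SOURCE A (Python) =====
-- def _reconstruct_json_from_lines(text: str) -> str:
--     """
--     尝试从格式化的JSON中恢复完整的JSON字符串
--     """
--     import json
--     lines = text.splitlines()
--
--     # 找到开始和结束的括号
--     start_idx = -1
--     end_idx = -1
--     for i, line in enumerate(lines):
--         if '{' in line or '[' in line:
--             if start_idx == -1:
--                 start_idx = i
--         if '}' in line or ']' in line: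
--             end_idx = i
--
--     if start_idx >= 0 and end_idx >= start_idx:
--         # 合并从start到end的所有行
--         merged = "".join(lines[start_idx:end_idx+1])
--         return merged
--
--     return text
-- ===== SOURCE B (Python) =====
-- def _reconstruct_json_from_lines(text: str) -> str:
--     # Trim, instead of search: drop leading lines without an opening bracket,
--     # then drop trailing lines without a closing bracket; whatever survives is
--     # exactly lines[start_idx:end_idx+1]; if nothing survives, the guard would
--     # have failed, so return the original text.
--     segment = text.splitlines()
--     while segment and '{' not in segment[0] and '[' not in segment[0]:
--         segment = segment[1:]
--     while segment and '}' not in segment[-1] and ']' not in segment[-1]: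
--         segment = segment[:-1]
--     return "".join(segment) if segment else text
-- ===== Notes on version B (the rewrite author's own statement) =====
-- stated objective: alternative
-- what changed: Replaced A's index bookkeeping (one enumerate pass tracking start_idx/end_idx plus a >=-guard and a slice) by index-free list trimming: drop the leading lines without an opening bracket, drop the trailing lines without a closing bracket, and join the surviving segment, falling back to text when the segment is empty.
import Mathlib
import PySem

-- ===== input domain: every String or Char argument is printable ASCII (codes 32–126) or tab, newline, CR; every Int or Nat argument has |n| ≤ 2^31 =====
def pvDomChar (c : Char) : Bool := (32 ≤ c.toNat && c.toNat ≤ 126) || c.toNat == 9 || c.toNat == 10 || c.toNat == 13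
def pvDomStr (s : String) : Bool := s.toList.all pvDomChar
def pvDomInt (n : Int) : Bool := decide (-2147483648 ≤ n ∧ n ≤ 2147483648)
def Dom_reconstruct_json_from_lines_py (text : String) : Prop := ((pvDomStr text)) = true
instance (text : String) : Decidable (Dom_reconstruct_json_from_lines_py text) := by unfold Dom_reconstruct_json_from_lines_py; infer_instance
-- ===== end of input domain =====

-- B replaces A's fused index-tracking scan + guarded slice by index-free trimming (drop leading no-open lines, drop trailing no-close lines, join the remainder); objective: alternative decomposition, same cost.


-- ===== PORT A =====
-- one pass over enumerate(lines) carrying (start_idx, end_idx)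
def reconstruct_json_from_lines_py (text : String) : String :=
  let lines := PySem.Str.splitlines text
  let p := (PySem.List.enumerate lines).foldl
    (fun (st : Int × Int) (il : Int × String) =>
      (if PySem.Str.isIn "{" il.2 || PySem.Str.isIn "[" il.2 then
         (if st.1 == -1 then il.1 else st.1) else st.1,
       if PySem.Str.isIn "}" il.2 || PySem.Str.isIn "]" il.2 then il.1 else st.2))
    (-1, -1)
  if 0 ≤ p.1 ∧ p.1 ≤ p.2 then
    PySem.Str.join "" (PySem.List.slice lines (some p.1) (some (p.2 + 1)))
  else text

-- ===== PORT B =====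
-- 'line has no opening bracket' / 'line has no closing bracket'
def pvNoOpen (l : String) : Bool := !(PySem.Str.isIn "{" l || PySem.Str.isIn "[" l)
def pvNoClose (l : String) : Bool := !(PySem.Str.isIn "}" l || PySem.Str.isIn "]" l)

-- Source B's first while-loop (pop the head while it has no open bracket) is dropWhile;
-- its second while-loop (pop the last element while it has no close bracket) is
-- dropWhile on the reversed list, reversed back.
def reconstruct_json_from_lines_py_alt (text : String) : String :=
  let seg0 := (PySem.Str.splitlines text).dropWhile pvNoOpen
  let seg := (seg0.reverse.dropWhile pvNoClose).reverse
  if seg.isEmpty then text else PySem.Str.join "" seg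

-- ===== PRECONDITION & SPEC =====
def Spec_reconstruct_json_from_lines_py (text : String) (out : String) : Prop := out = reconstruct_json_from_lines_py_alt text
instance (text : String) (out : String) : Decidable (Spec_reconstruct_json_from_lines_py text out) := by unfold Spec_reconstruct_json_from_lines_py; infer_instance

-- ===== CLAIM (what is proved, stated in full; the proofs are below) =====
def Claim_equal_reconstruct_json_from_lines_py : Prop := ∀ (text : String), Dom_reconstruct_json_from_lines_py text → Spec_reconstruct_json_from_lines_py text (reconstruct_json_from_lines_py text)

-- ===== LEMMAS AND PROOFS =====

-- A's fused fold, split: the two per-line updates as separate step functions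
def pvStepOpen (s : Int) (il : Int × String) : Int :=
  if PySem.Str.isIn "{" il.2 || PySem.Str.isIn "[" il.2 then
    (if s == -1 then il.1 else s) else s

def pvStepClose (e : Int) (il : Int × String) : Int :=
  if PySem.Str.isIn "}" il.2 || PySem.Str.isIn "]" il.2 then il.1 else e

-- first-open / last-close searches, as characterisations of A's fold components
def pvFindOpen : List String → Int → Int
  | [], _ => -1
  | l :: ls, i =>
      if PySem.Str.isIn "{" l || PySem.Str.isIn "[" l then i else pvFindOpen ls (i + 1)

def pvFindClose : List String → Int → Int
  | [], _ => -1
  | l :: ls, i =>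
      if PySem.Str.isIn "}" l || PySem.Str.isIn "]" l then i else pvFindClose ls (i - 1)

lemma pv_enumerate_append {α : Type} (xs ys : List α) (s : Int) :
    PySem.List.enumerate (xs ++ ys) s
      = PySem.List.enumerate xs s ++ PySem.List.enumerate ys (s + xs.length) := by
  induction xs generalizing s with
  | nil => simp [PySem.List.enumerate_nil]
  | cons x xs ih =>
      simp only [List.cons_append, PySem.List.enumerate_cons, ih, List.length_cons]
      have : s + 1 + (xs.length : Int) = s + ((xs.length : Int) + 1) := by ring
      push_cast
      rw [this]

lemma pv_foldOpen_ne (l : List (Int × String)) (s : Int) (h : s ≠ -1) :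
    l.foldl pvStepOpen s = s := by
  induction l with
  | nil => rfl
  | cons x l ih =>
      have hx : pvStepOpen s x = s := by simp [pvStepOpen, h]
      simp [List.foldl_cons, hx, ih]

lemma pv_foldOpen (lines : List String) (i : Int) (hi : 0 ≤ i) :
    (PySem.List.enumerate lines i).foldl pvStepOpen (-1) = pvFindOpen lines i := by
  induction lines generalizing i with
  | nil => rfl
  | cons l ls ih =>
      rw [PySem.List.enumerate_cons, List.foldl_cons]
      by_cases hq : (PySem.Str.isIn "{" l || PySem.Str.isIn "[" l) = true
      · have : pvStepOpen (-1) (i, l) = i := by unfold pvStepOpen; rw [if_pos hq]; norm_num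
        rw [this, pv_foldOpen_ne _ _ (by omega), pvFindOpen, if_pos hq]
      · have : pvStepOpen (-1) (i, l) = -1 := by unfold pvStepOpen; rw [if_neg hq]
        rw [this, ih (i + 1) (by omega), pvFindOpen, if_neg hq]

lemma pv_foldClose (lines : List String) (i : Int) :
    (PySem.List.enumerate lines i).foldl pvStepClose (-1)
      = pvFindClose lines.reverse (i + lines.length - 1) := by
  induction lines using List.reverseRecOn generalizing i with
  | nil => rfl
  | append_singleton ys y ih =>
      rw [pv_enumerate_append, List.foldl_append, PySem.List.enumerate_cons,
          PySem.List.enumerate_nil, List.foldl_cons, List.foldl_nil, List.reverse_append]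
      simp only [List.reverse_singleton, List.singleton_append, List.length_append,
        List.length_singleton]
      rw [pvFindClose]
      by_cases hq : (PySem.Str.isIn "}" y || PySem.Str.isIn "]" y) = true
      · rw [if_pos hq]
        have : pvStepClose ((PySem.List.enumerate ys i).foldl pvStepClose (-1))
            (i + ys.length, y) = i + ys.length := by unfold pvStepClose; rw [if_pos hq]
        rw [this]; push_cast; ring
      · rw [if_neg hq]
        have : pvStepClose ((PySem.List.enumerate ys i).foldl pvStepClose (-1))
            (i + ys.length, y) = (PySem.List.enumerate ys i).foldl pvStepClose (-1) := by
          unfold pvStepClose; rw [if_neg hq]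
        rw [this, ih]
        congr 1
        push_cast; ring

-- pvFindOpen in terms of takeWhile/dropWhile
lemma pv_findOpen_eq (l : List String) (i : Int) :
    pvFindOpen l i =
      if l.dropWhile pvNoOpen = [] then -1
      else i + ((l.takeWhile pvNoOpen).length : Int) := by
  induction l generalizing i with
  | nil => simp [pvFindOpen]
  | cons x xs ih =>
      cases hq : (PySem.Str.isIn "{" x || PySem.Str.isIn "[" x) with
      | true =>
          have hn : pvNoOpen x = false := by unfold pvNoOpen; rw [hq]; rfl
          rw [pvFindOpen, if_pos hq, List.dropWhile_cons, List.takeWhile_cons, hn]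
          simp
      | false =>
          have hn : pvNoOpen x = true := by unfold pvNoOpen; rw [hq]; rfl
          rw [pvFindOpen, if_neg (by rw [hq]; exact Bool.false_ne_true),
              ih, List.dropWhile_cons, List.takeWhile_cons, hn]
          simp only [if_true, List.length_cons]
          split_ifs with h
          · rfl
          · push_cast; ring

-- pvFindClose in terms of takeWhile/dropWhile (on the already-reversed list)
lemma pv_findClose_eq (l : List String) (i : Int) :
    pvFindClose l i =
      if l.dropWhile pvNoClose = [] then -1
      else i - ((l.takeWhile pvNoClose).length : Int) := by
  induction l generalizing i with
  | nil => simp [pvFindClose]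
  | cons x xs ih =>
      cases hq : (PySem.Str.isIn "}" x || PySem.Str.isIn "]" x) with
      | true =>
          have hn : pvNoClose x = false := by unfold pvNoClose; rw [hq]; rfl
          rw [pvFindClose, if_pos hq, List.dropWhile_cons, List.takeWhile_cons, hn]
          simp
      | false =>
          have hn : pvNoClose x = true := by unfold pvNoClose; rw [hq]; rfl
          rw [pvFindClose, if_neg (by rw [hq]; exact Bool.false_ne_true),
              ih, List.dropWhile_cons, List.takeWhile_cons, hn]
          simp only [if_true, List.length_cons]
          split_ifs with h
          · rfl
          · push_cast; ring

-- takeWhile length in terms of dropWhile length (over Int)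
lemma pv_len_takeWhile {α : Type} (p : α → Bool) (l : List α) :
    ((l.takeWhile p).length : Int) = (l.length : Int) - ((l.dropWhile p).length : Int) := by
  have h := congrArg List.length (List.takeWhile_append_dropWhile (p := p) (l := l))
  rw [List.length_append] at h
  omega

-- ===== VERDICT (by name: the statement is the Claim_ definition above) =====
theorem reconstruct_json_from_lines_py_spec : Claim_equal_reconstruct_json_from_lines_py := by
  intro text _
  unfold Spec_reconstruct_json_from_lines_py reconstruct_json_from_lines_py
    reconstruct_json_from_lines_py_alt
  simp only [show (fun (st : Int × Int) (il : Int × String) =>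
      (if PySem.Str.isIn "{" il.2 || PySem.Str.isIn "[" il.2 then
         (if st.1 == -1 then il.1 else st.1) else st.1,
       if PySem.Str.isIn "}" il.2 || PySem.Str.isIn "]" il.2 then il.1 else st.2))
    = (fun (st : Int × Int) (il : Int × String) =>
        (pvStepOpen st.1 il, pvStepClose st.2 il)) from rfl]
  rw [PySem.List.foldl_prod_mk pvStepOpen pvStepClose]
  rw [pv_foldOpen _ 0 le_rfl, pv_foldClose, pv_findOpen_eq, pv_findClose_eq,
      pv_len_takeWhile pvNoClose (PySem.Str.splitlines text).reverse]
  simp only [zero_add, List.length_reverse]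
  generalize (PySem.Str.splitlines text) = lines
  rcases hmid : lines.dropWhile pvNoOpen with - | ⟨m, ms⟩
  · simp
  · have hsplit : lines.takeWhile pvNoOpen ++ (m :: ms) = lines := by
      rw [← hmid]; exact List.takeWhile_append_dropWhile
    have hrev : lines.reverse = (m :: ms).reverse ++ (lines.takeWhile pvNoOpen).reverse := by
      conv_lhs => rw [← hsplit]
      rw [List.reverse_append]
    have hlen : lines.length = (lines.takeWhile pvNoOpen).length + (ms.length + 1) := by
      conv_lhs => rw [← hsplit]
      simp [List.length_append]
    simp only [hrev, List.dropWhile_append, reduceCtorEq, if_false]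
    rcases hmdw : ((m :: ms).reverse.dropWhile pvNoClose) with - | ⟨c, cs⟩
    · -- no closing bracket in the trimmed tail: A's guard fails, B's segment is empty
      have hd := List.length_dropWhile_le (p := pvNoClose) (l := (lines.takeWhile pvNoOpen).reverse)
      rw [List.length_reverse] at hd
      simp only [List.isEmpty_nil, if_true, List.reverse_nil]
      by_cases hdw : List.dropWhile pvNoClose (lines.takeWhile pvNoOpen).reverse = []
      · rw [if_pos hdw, if_neg (by omega)]
      · rw [if_neg hdw, if_neg (by omega)]
    · -- closing bracket found: both sides return the same joined segment
      have htw : (m :: ms).reverse.takeWhile pvNoClose ++ (c :: cs) = (m :: ms).reverse := by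
        rw [← hmdw]; exact List.takeWhile_append_dropWhile
      have hlen2 : ms.length + 1 = ((m :: ms).reverse.takeWhile pvNoClose).length + (cs.length + 1) := by
        have := congrArg List.length htw
        rw [List.length_append, List.length_reverse] at this
        simpa using this.symm
      have hne : ((c :: cs) ++ (lines.takeWhile pvNoOpen).reverse) ≠ [] := by simp
      have hcc : (c :: cs).length = cs.length + 1 := rfl
      have hie : ((c :: cs).reverse).isEmpty = false := by simp
      simp only [List.isEmpty_cons, Bool.false_eq_true, if_false, hie]
      rw [if_neg hne]
      rw [if_pos (And.intro (Int.natCast_nonneg _)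
        (by rw [List.length_append, List.length_reverse]; push_cast; omega))]
      have heq : ((lines.length : Int) - 1 -
            ((lines.length : Int) - (((c :: cs) ++ (lines.takeWhile pvNoOpen).reverse).length : Int)) + 1)
          = (((lines.takeWhile pvNoOpen).length + (cs.length + 1) : Nat) : Int) := by
        rw [List.length_append, List.length_reverse]
        push_cast
        omega
      rw [heq, PySem.List.slice_natCast]
      have hdrop : lines.drop (lines.takeWhile pvNoOpen).length = m :: ms := by
        have h := List.drop_left (l₁ := lines.takeWhile pvNoOpen) (l₂ := m :: ms)
        rw [hsplit] at h
        exact h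
      have hmidrev : m :: ms = (c :: cs).reverse ++ ((m :: ms).reverse.takeWhile pvNoClose).reverse := by
        rw [← List.reverse_append, htw, List.reverse_reverse]
      rw [show (lines.takeWhile pvNoOpen).length + (cs.length + 1) - (lines.takeWhile pvNoOpen).length
            = cs.length + 1 from by omega,
          hdrop, hmidrev, List.take_left' (by simp)]
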